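-- pv_equiv track=rewrite | github.com/roalj/Seminar2-Data-Extraction | implementation-extraction/run-extraction.py | combine_text
-- ===== SOURCE A (Python) =====
-- def combine_text(text):
--     combined = []
--     new_combined = ""
--     for x in text:
--         if len(x) > 0 and x[0] == '<' and not new_combined == "":
--             combined.append(new_combined)
--             new_combined = x
--         else:
--             new_combined += x
--     combined.append(new_combined)
--     return combined
-- ===== SOURCE B (Python) =====
-- def combine_text(text):
--     # Pass 1: collect split boundaries; pass 2: join slices between consecutive boundaries.
--     bounds = [0]
--     started = False
--     for i, x in enumerate(text):
--         if x.startswith('<') and started: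
--             bounds.append(i)
--         if x != "":
--             started = True
--     bounds.append(len(text))
--     return ["".join(text[a:b]) for a, b in zip(bounds, bounds[1:])]
-- ===== Notes on version B (the rewrite author's own statement) =====
-- stated objective: alternative
-- what changed: B replaces A's single pass that grows an accumulator string with a two-pass scheme: first collect split-boundary indices (a 'started' flag plus enumerate), then join the slices between consecutive boundaries.
import Mathlib
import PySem

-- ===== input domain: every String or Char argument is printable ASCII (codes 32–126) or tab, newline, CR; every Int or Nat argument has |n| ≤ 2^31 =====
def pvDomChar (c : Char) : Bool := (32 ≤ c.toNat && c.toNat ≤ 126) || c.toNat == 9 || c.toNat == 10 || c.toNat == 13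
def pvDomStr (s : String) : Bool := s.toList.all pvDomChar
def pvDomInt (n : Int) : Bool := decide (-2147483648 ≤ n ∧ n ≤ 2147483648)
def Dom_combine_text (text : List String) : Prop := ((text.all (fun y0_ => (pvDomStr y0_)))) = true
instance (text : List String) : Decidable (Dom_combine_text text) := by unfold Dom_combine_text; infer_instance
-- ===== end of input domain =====

-- B replaces A's single pass growing an accumulator string by a two-pass scheme
-- (collect split-boundary indices, then join the slices between them); same cost, different decomposition.

-- ===== PORT A =====
def combine_text (text : List String) : List String :=
  let st := text.foldl
    (fun (st : List String × String) x =>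
      if 0 < PySem.Str.len x ∧ PySem.Str.pyGet? x 0 = some '<' ∧ ¬ st.2 = "" then
        (st.1 ++ [st.2], x)
      else
        (st.1, st.2 ++ x))
    ([], "")
  st.1 ++ [st.2]

-- ===== PORT B =====
def combine_text_alt (text : List String) : List String :=
  let st := (PySem.List.enumerate text 0).foldl
    (fun (st : List Int × Bool) p =>
      (if PySem.Str.startswith p.2 "<" && st.2 then st.1 ++ [p.1] else st.1,
       if ¬ p.2 = "" then true else st.2))
    ([0], false)
  let bounds := st.1 ++ [(text.length : Int)]
  (bounds.zip (PySem.List.slice bounds (some 1) none)).map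
    (fun p => PySem.Str.join "" (PySem.List.slice text (some p.1) (some p.2)))

-- ===== PRECONDITION & SPEC =====
def Spec_combine_text (text : List String) (out : List String) : Prop := out = combine_text_alt text
instance (text : List String) (out : List String) : Decidable (Spec_combine_text text out) := by unfold Spec_combine_text; infer_instance

-- ===== CLAIM (what is proved, stated in full; the proofs are below) =====
def Claim_equal_combine_text : Prop := ∀ (text : List String), Dom_combine_text text → Spec_combine_text text (combine_text text)

-- ===== LEMMAS AND PROOFS =====

-- Common recursive specification: A's grouping loop, written structurally.
def pvGroups : List String → String → List String
  | [], cur => [cur]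
  | x :: xs, cur =>
      if 0 < PySem.Str.len x ∧ PySem.Str.pyGet? x 0 = some '<' ∧ ¬ cur = "" then
        cur :: pvGroups xs x
      else
        pvGroups xs (cur ++ x)

-- B's interior split boundaries, written structurally over Nat indices.
def pvInner : List String → Nat → Bool → List Nat
  | [], _, _ => []
  | x :: xs, i, s =>
      (if PySem.Str.startswith x "<" && s then [i] else []) ++
        pvInner xs (i + 1) (if ¬ x = "" then true else s)

-- Joins of the slices between consecutive Nat boundaries.
def pvSlices : List String → List Nat → List String
  | L, a :: b :: bs =>
      PySem.Str.join "" ((L.drop a).take (b - a)) :: pvSlices L (b :: bs)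
  | _, _ => []

theorem pv_chars_join (l : List (List Char)) : PySem.Chars.join [] l = l.flatten := by
  simp only [PySem.Chars.join, List.intercalate]
  induction l with
  | nil => rfl
  | cons a t ih =>
    cases t with
    | nil => simp
    | cons b u => simp_all [List.intersperse]

theorem pv_join_singleton (x : String) : PySem.Str.join "" [x] = x := by
  apply String.toList_inj.mp; simp [pysem, pv_chars_join]

theorem pv_join_append (l : List String) (x : String) :
    PySem.Str.join "" (l ++ [x]) = PySem.Str.join "" l ++ x := by
  apply String.toList_inj.mp; simp [pysem, pv_chars_join]

theorem pv_append_eq_empty (a x : String) : a ++ x = "" ↔ a = "" ∧ x = "" := by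
  constructor
  · intro h
    have h' := congrArg String.toList h
    simp at h'
    exact ⟨String.toList_inj.mp (by simp [h'.1]), String.toList_inj.mp (by simp [h'.2])⟩
  · rintro ⟨rfl, rfl⟩; rfl

theorem pv_startswith_iff (x : String) :
    PySem.Str.startswith x "<" = true ↔
      (0 < PySem.Str.len x ∧ PySem.Str.pyGet? x 0 = some '<') := by
  simp [pysem, PySem.Chars.startswith_iff]
  cases h : x.toList with
  | nil => simp [PySem.List.pyGet?]
  | cons c t =>
    simp [List.prefix_cons_iff]
    constructor
    · rintro rfl
      have hl : x.length = t.length + 1 := by rw [← String.length_toList, h]; simp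
      exact ⟨by omega, rfl⟩
    · rintro ⟨h1, h2⟩
      exact h2.symm

theorem pv_startswith_ne_empty (x : String) (h : PySem.Str.startswith x "<" = true) :
    ¬ x = "" := by
  intro hx; subst hx; simp [pysem, PySem.Chars.startswith_iff] at h

-- A's fold equals pvGroups.
theorem pv_foldA (xs : List String) (acc : List String) (cur : String) :
    (xs.foldl
      (fun (st : List String × String) x =>
        if 0 < PySem.Str.len x ∧ PySem.Str.pyGet? x 0 = some '<' ∧ ¬ st.2 = "" then
          (st.1 ++ [st.2], x)
        else
          (st.1, st.2 ++ x)) (acc, cur)).1 ++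
      [(xs.foldl
        (fun (st : List String × String) x =>
          if 0 < PySem.Str.len x ∧ PySem.Str.pyGet? x 0 = some '<' ∧ ¬ st.2 = "" then
            (st.1 ++ [st.2], x)
          else
            (st.1, st.2 ++ x)) (acc, cur)).2] = acc ++ pvGroups xs cur := by
  induction xs generalizing acc cur with
  | nil => simp [pvGroups]
  | cons x xs ih =>
    simp only [List.foldl_cons, pvGroups]
    split
    · rw [ih]; simp
    · rw [ih]

-- B's fold over enumerate equals [0] ++ cast of pvInner.
theorem pv_foldB (xs : List String) (i : Nat) (acc : List Int) (s : Bool) :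
    ((PySem.List.enumerate xs (i : Int)).foldl
      (fun (st : List Int × Bool) p =>
        (if PySem.Str.startswith p.2 "<" && st.2 then st.1 ++ [p.1] else st.1,
         if ¬ p.2 = "" then true else st.2)) (acc, s)).1
      = acc ++ (pvInner xs i s).map (Nat.cast : Nat → Int) := by
  induction xs generalizing i acc s with
  | nil => simp [pvInner, PySem.List.enumerate]
  | cons x xs ih =>
    rw [PySem.List.enumerate_cons]
    simp only [List.foldl_cons, pvInner]
    have : (i : Int) + 1 = ((i + 1 : Nat) : Int) := by push_cast; ring
    rw [this, ih]
    split <;> simp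

-- Shifting the start index of pvInner shifts every boundary.
theorem pv_inner_shift (xs : List String) (i j : Nat) (s : Bool) :
    pvInner xs (i + j) s = (pvInner xs j s).map (i + ·) := by
  induction xs generalizing j s with
  | nil => simp [pvInner]
  | cons x xs ih =>
    simp only [pvInner, List.map_append]
    congr 1
    · split <;> simp
    · have : i + j + 1 = i + (j + 1) := by omega
      rw [this, ih]

-- Dropping a common prefix and shifting all boundaries by its length leaves the slices unchanged.
theorem pv_slices_shift (bs : List Nat) (p M : List String) :
    pvSlices (p ++ M) (bs.map (p.length + ·)) = pvSlices M bs := by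
  induction bs with
  | nil => rfl
  | cons a bs ih =>
    cases bs with
    | nil => rfl
    | cons b bs' =>
      simp only [List.map_cons] at ih ⊢
      simp only [pvSlices]
      rw [List.drop_length_add_append, show p.length + b - (p.length + a) = b - a from by omega, ih]

-- Bridge from B's zip-with-Int-bounds form to pvSlices.
theorem pv_zip_slices (bs : List Nat) (L : List String) :
    (((bs.map (Nat.cast : Nat → Int)).zip
        (PySem.List.slice (bs.map (Nat.cast : Nat → Int)) (some 1) none)).map
      (fun p => PySem.Str.join "" (PySem.List.slice L (some p.1) (some p.2))))
      = pvSlices L bs := by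
  rw [PySem.List.slice_from_one]
  induction bs with
  | nil => rfl
  | cons a bs ih =>
    cases bs with
    | nil => rfl
    | cons b bs' =>
      simp only [List.map_cons, List.tail_cons, List.zip_cons_cons] at ih ⊢
      simp only [pvSlices]
      rw [PySem.List.slice_natCast]
      rw [ih]

-- Main invariant: slicing between B's boundaries reproduces A's grouping.
theorem pv_main (xs : List String) (p : List String) (s : Bool)
    (hs : s = true ↔ ¬ PySem.Str.join "" p = "") :
    pvSlices (p ++ xs) (0 :: (pvInner xs p.length s ++ [p.length + xs.length]))
      = pvGroups xs (PySem.Str.join "" p) := by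
  induction xs generalizing p s with
  | nil =>
    simp [pvInner, pvSlices, pvGroups]
  | cons x xs ih =>
    by_cases hsw : PySem.Str.startswith x "<" = true ∧ s = true
    · -- split here
      obtain ⟨hsw1, hs1⟩ := hsw
      have hxne : ¬ x = "" := pv_startswith_ne_empty x hsw1
      have hcond : (0 < PySem.Str.len x ∧ PySem.Str.pyGet? x 0 = some '<' ∧
          ¬ PySem.Str.join "" p = "") := by
        obtain ⟨h1, h2⟩ := (pv_startswith_iff x).mp hsw1
        exact ⟨h1, h2, hs.mp hs1⟩
      simp only [pvInner, hsw1, hs1, Bool.and_self, if_pos, hxne, not_false_iff]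
      simp only [pvGroups, if_pos hcond]
      simp only [List.singleton_append, List.cons_append, List.nil_append, pvSlices]
      rw [Nat.sub_zero, List.drop_zero, List.take_left]
      congr 1
      have h1 : pvInner xs (p.length + 1) true = (pvInner xs 1 true).map (p.length + ·) :=
        pv_inner_shift xs p.length 1 true
      have hrw : (p.length :: (pvInner xs (p.length + 1) true ++ [p.length + (x :: xs).length]))
          = ((0 :: (pvInner xs 1 true ++ [1 + xs.length])).map (p.length + ·)) := by
        simp only [List.map_cons, List.map_append, List.map_nil, h1, List.length_cons]
        simp [show 1 + xs.length = xs.length + 1 from by omega]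
      rw [show p ++ x :: xs = p ++ ([x] ++ xs) from by simp] at *
      rw [hrw, pv_slices_shift (0 :: (pvInner xs 1 true ++ [1 + xs.length])) p ([x] ++ xs)]
      have hsx : true = true ↔ ¬ PySem.Str.join "" [x] = "" := by
        rw [pv_join_singleton]; simp [hxne]
      have hh := ih [x] true hsx
      simp only [List.length_singleton, List.length_cons, List.length_nil] at hh ⊢
      rw [show 1 + xs.length = [x].length + xs.length from by simp] at *
      rw [hh, pv_join_singleton]
    · -- no split
      have hsw' : ¬ (PySem.Str.startswith x "<" && s) = true := by
        simp only [Bool.and_eq_true]; exact hsw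
      have hcond : ¬ (0 < PySem.Str.len x ∧ PySem.Str.pyGet? x 0 = some '<' ∧
          ¬ PySem.Str.join "" p = "") := by
        rintro ⟨h1, h2, h3⟩
        exact hsw ⟨(pv_startswith_iff x).mpr ⟨h1, h2⟩, hs.mpr h3⟩
      simp only [pvInner, hsw', if_neg, Bool.false_eq_true, not_false_iff, List.nil_append]
      simp only [pvGroups, if_neg hcond]
      have hs' : (if ¬ x = "" then true else s) = true ↔
          ¬ PySem.Str.join "" (p ++ [x]) = "" := by
        rw [pv_join_append, pv_append_eq_empty]
        by_cases hx : x = "" <;> simp [hx, hs]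
      have hh := ih (p ++ [x]) _ hs'
      rw [pv_join_append] at hh
      rw [show p ++ x :: xs = (p ++ [x]) ++ xs from by simp,
          show p.length + 1 = (p ++ [x]).length from by simp,
          show p.length + (x :: xs).length = (p ++ [x]).length + xs.length from by simp; omega]
      exact hh

-- ===== VERDICT (by name: the statement is the Claim_ definition above) =====
theorem combine_text_spec : Claim_equal_combine_text := by
  unfold Claim_equal_combine_text
  intro text _
  unfold Spec_combine_text combine_text combine_text_alt
  simp only []
  rw [pv_foldA text [] ""]
  have hB := pv_foldB text 0 [0] false
  simp only [Nat.cast_zero] at hB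
  rw [hB]
  have hb : ([(0 : Int)] ++ (pvInner text 0 false).map (Nat.cast : Nat → Int)) ++
      [(text.length : Int)]
      = ((0 :: (pvInner text 0 false ++ [text.length])).map (Nat.cast : Nat → Int)) := by
    simp
  rw [hb, pv_zip_slices]
  have hjoin : PySem.Str.join "" ([] : List String) = "" := by
    apply String.toList_inj.mp; simp [pysem, pv_chars_join]
  have hmain := pv_main text [] false (by simp [hjoin])
  simp only [List.length_nil, List.nil_append, Nat.zero_add, hjoin] at hmain
  rw [List.nil_append, ← hmain]
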